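-- pv_equiv track=rewrite | github.com/SIGMazer/AoC2025 | day4/solve.py | part2
-- ===== SOURCE A (Python) =====
-- def find_adjacent_count(grid: list, r: int, c: int) -> int:
--     directions = [(-1, 0), (1, 0), (0, -1), (0, 1), (-1, -1), (-1, 1), (1, -1), (1, 1)]
--     adjacent_count = 0
--     rows = len(grid)
--     cols = len(grid[0]) if rows > 0 else 0
--     for dr, dc in directions:
--         nr, nc = r + dr, c + dc
--         if 0 <= nr < rows and 0 <= nc < cols and grid[nr][nc] == '@':
--             adjacent_count += 1
--     return adjacent_count
--
-- def part2(grid: list) -> int: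
--     result: int = 0
--
--     # find @ in grid and look for adjacent @ in 4 directions and diagonal
--     # if the adjacent count < 4 then increase result by 1 and remove that @ from grid
--     rows = len(grid)
--     cols = len(grid[0]) if rows > 0 else 0
--     while True:
--         result_old = result
--
--         for r in range(rows):
--             for c in range(cols):
--                 if grid[r][c] == '@':
--                     adjacent_count = find_adjacent_count(grid, r, c)
--                     if adjacent_count < 4:
--                         result += 1
--                         grid[r] = grid[r][:c] + '.' + grid[r][c+1:]
--         if result == result_old:
--             break
--     return result
-- ===== SOURCE B (Python) =====
-- DIRS = [(-1, 0), (1, 0), (0, -1), (0, 1), (-1, -1), (-1, 1), (1, -1), (1, 1)]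
--
-- def neighbors_alive(rows, cols, alive, r, c):
--     a = 0
--     for dr, dc in DIRS:
--         nr, nc = r + dr, c + dc
--         if 0 <= nr < rows and 0 <= nc < cols and (nr, nc) in alive:
--             a += 1
--     return a
--
-- def part2(grid: list) -> int:
--     rows = len(grid)
--     cols = len(grid[0]) if rows > 0 else 0
--     # the '@' cells as a coordinate set: no string surgery afterwards
--     alive = set()
--     for r in range(rows):
--         for c in range(cols):
--             if grid[r][c] == '@':
--                 alive.add((r, c))
--     # neighbour-count table, computed once, then maintained incrementally:
--     # no per-cell 8-direction recount inside the erosion loop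
--     cnt = {}
--     for r in range(rows):
--         for c in range(cols):
--             cnt[(r, c)] = neighbors_alive(rows, cols, alive, r, c)
--     removed = 0
--     while True:
--         old = removed
--         for r in range(rows):
--             for c in range(cols):
--                 if (r, c) in alive and cnt[(r, c)] < 4:
--                     alive.discard((r, c))
--                     removed += 1
--                     for dr, dc in DIRS:
--                         nr, nc = r + dr, c + dc
--                         if 0 <= nr < rows and 0 <= nc < cols:
--                             cnt[(nr, nc)] -= 1
--         if removed == old:
--             break
--     return removed
-- ===== Notes on version B (the rewrite author's own statement) =====
-- stated objective: alternative
-- what changed: B replaces A's per-cell 8-direction recount over the current strings and per-removal string slicing by a coordinate set plus a neighbour-count table that is built once and decremented incrementally on each removal, so the erosion loop maintains counts instead of recomputing them and never rebuilds a row string.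
import Mathlib
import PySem

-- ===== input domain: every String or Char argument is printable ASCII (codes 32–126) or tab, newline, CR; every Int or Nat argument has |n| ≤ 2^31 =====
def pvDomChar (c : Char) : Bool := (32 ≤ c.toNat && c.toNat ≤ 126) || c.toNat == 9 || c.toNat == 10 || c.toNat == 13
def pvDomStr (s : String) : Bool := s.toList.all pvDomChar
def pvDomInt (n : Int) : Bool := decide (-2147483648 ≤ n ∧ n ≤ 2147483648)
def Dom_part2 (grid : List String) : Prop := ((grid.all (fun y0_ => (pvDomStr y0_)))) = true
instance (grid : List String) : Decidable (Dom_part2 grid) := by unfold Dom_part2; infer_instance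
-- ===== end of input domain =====

-- B replaces A's per-cell 8-direction recount and per-removal string rebuild by a coordinate set plus an
-- incrementally maintained neighbour-count table (an alternative algorithm of similar cost); A mutates its
-- argument `grid` in place while B does not — the equivalence proved here is about the return value only.

-- ===== PORT A =====
-- the `directions` list (shared literal data; B's Python has the identical DIRS constant)
def pvDirs : List (Int × Int) := [(-1,0),(1,0),(0,-1),(0,1),(-1,-1),(-1,1),(1,-1),(1,1)]

-- grid[r][c] as Python evaluates it (none = IndexError)
def pvAt (grid : List String) (r c : Int) : Option Char :=
  (PySem.List.pyGet? grid r).bind (fun row => PySem.Str.pyGet? row c)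

def find_adjacent_count (grid : List String) (r c : Int) : Int :=
  let rows : Int := PySem.List.len grid
  let cols : Int := if rows > 0 then PySem.Str.len (grid.headD "") else 0  -- len(grid[0]), guarded by rows > 0
  pvDirs.foldl (fun acc d =>
    if 0 ≤ r + d.1 ∧ r + d.1 < rows ∧ 0 ≤ c + d.2 ∧ c + d.2 < cols ∧
        pvAt grid (r + d.1) (c + d.2) = some '@' then acc + 1 else acc) 0

-- grid[r] = grid[r][:c] + '.' + grid[r][c+1:]  (computed on code points; the indices are in range
-- whenever A executes this line, since it is guarded by grid[r][c] == '@')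
def pvSetDot (grid : List String) (r c : Int) : List String :=
  let row := ((PySem.List.pyGet? grid r).getD "").toList
  PySem.List.pySetD grid r
    (String.ofList (PySem.List.slice row none (some c) ++ ['.'] ++ PySem.List.slice row (some (c+1)) none))

-- one sweep of the doubly nested for-loop inside A's while-body
def pvPassA (rows cols : Int) (grid : List String) (result : Int) : List String × Int :=
  (PySem.List.pyRange 0 rows 1).foldl (fun st r =>
    (PySem.List.pyRange 0 cols 1).foldl (fun st c =>
      if pvAt st.1 r c = some '@' then
        if find_adjacent_count st.1 r c < 4 then (pvSetDot st.1 r c, st.2 + 1) else st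
      else st) st) (grid, result)

-- termination measure for the while-loop: number of '@' characters left
def pvAtCount (grid : List String) : Nat := (grid.map (fun s => s.toList.count '@')).sum

-- helpers reducing pvAt / pvSetDot to plain list operations (cited by the termination proof below)
lemma pvAt_nonneg (g : List String) (r c : Int) (hr : 0 ≤ r) (hc : 0 ≤ c) :
    pvAt g r c = (g[r.toNat]?).bind (fun row => row.toList[c.toNat]?) := by
  unfold pvAt
  rw [PySem.List.pyGet?_of_nonneg _ hr]
  cases g[r.toNat]? with
  | none => rfl
  | some row =>
    simp [PySem.Str.pyGet?_eq, PySem.Chars.pyGet?_eq_listPyGet?, PySem.List.pyGet?_of_nonneg _ hc]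

lemma pvAt_elim (g : List String) (r c : Int) (ch : Char) (hr : 0 ≤ r) (hc : 0 ≤ c)
    (h : pvAt g r c = some ch) :
    ∃ row, g[r.toNat]? = some row ∧ row.toList[c.toNat]? = some ch := by
  rw [pvAt_nonneg g r c hr hc] at h
  cases hrow : g[r.toNat]? with
  | none => rw [hrow] at h; exact absurd h (by simp)
  | some row => rw [hrow] at h; exact ⟨row, rfl, h⟩

lemma pvSetDot_eq (g : List String) (r c : Int) (hr : 0 ≤ r) (hc : 0 ≤ c) (row : String)
    (hrow : PySem.List.pyGet? g r = some row) (hlt : c.toNat < row.toList.length) :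
    pvSetDot g r c = g.set r.toNat (String.ofList (row.toList.set c.toNat '.')) := by
  unfold pvSetDot
  rw [hrow, PySem.List.pySetD_of_nonneg _ _ hr, Option.getD_some,
      PySem.List.slice_to _ hc, PySem.List.slice_from _ (by omega : (0:Int) ≤ c + 1),
      (by omega : (c+1).toNat = c.toNat + 1), List.set_eq_take_cons_drop _ hlt]
  simp

-- each executed removal turns one '@' into '.', so a sweep that changed `result` shrank the measure
lemma pvAtCount_setDot (g : List String) (r c : Int) (hr : 0 ≤ r) (hc : 0 ≤ c)
    (h : pvAt g r c = some '@') : pvAtCount (pvSetDot g r c) + 1 = pvAtCount g := by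
  obtain ⟨row, hrow, hch⟩ := pvAt_elim g r c '@' hr hc h
  obtain ⟨hlt, hce⟩ := List.getElem?_eq_some_iff.mp hch
  obtain ⟨hrl, hre⟩ := List.getElem?_eq_some_iff.mp hrow
  rw [pvSetDot_eq g r c hr hc row (by rw [PySem.List.pyGet?_of_nonneg _ hr, hrow]) hlt]
  unfold pvAtCount
  rw [List.map_set]
  have hrow_cnt : (String.ofList (row.toList.set c.toNat '.')).toList.count '@' + 1
      = row.toList.count '@' := by
    rw [String.toList_ofList, List.set_eq_take_cons_drop _ hlt]
    conv_rhs => rw [← List.take_append_drop c.toNat row.toList,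
      List.drop_eq_getElem_cons hlt, hce]
    simp [List.count_append]
    omega
  have hgdec := List.take_append_drop r.toNat (g.map (fun s => s.toList.count '@'))
  rw [List.set_eq_take_cons_drop _ (by simpa using hrl)]
  conv_rhs => rw [← hgdec, List.drop_eq_getElem_cons (by simpa using hrl)]
  rw [List.sum_append, List.sum_append, List.sum_cons, List.sum_cons]
  rw [List.getElem_map, hre]
  omega

lemma pvPassA_dec (rows cols : Int) (grid : List String) (result : Int)
    (h : ¬ (pvPassA rows cols grid result).2 = result) :
    pvAtCount (pvPassA rows cols grid result).1 < pvAtCount grid := by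
  have main : (fun st : List String × Int =>
      (pvAtCount st.1 : Int) + st.2 = (pvAtCount grid : Int) + result ∧ result ≤ st.2)
      (pvPassA rows cols grid result) := by
    unfold pvPassA
    refine List.foldlRecOn (motive := fun st : List String × Int =>
        (pvAtCount st.1 : Int) + st.2 = (pvAtCount grid : Int) + result ∧ result ≤ st.2)
      _ _ ⟨rfl, le_refl result⟩ ?_
    intro st hst r hr
    refine List.foldlRecOn (motive := fun st : List String × Int =>
        (pvAtCount st.1 : Int) + st.2 = (pvAtCount grid : Int) + result ∧ result ≤ st.2)
      _ _ hst ?_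
    intro st2 hst2 c hc
    by_cases h1 : pvAt st2.1 r c = some '@'
    · by_cases h2 : find_adjacent_count st2.1 r c < 4
      · simp only [if_pos h1, if_pos h2]
        have hr0 : 0 ≤ r := (PySem.List.mem_pyRange_one.mp hr).1
        have hc0 : 0 ≤ c := (PySem.List.mem_pyRange_one.mp hc).1
        have hct := pvAtCount_setDot st2.1 r c hr0 hc0 h1
        refine ⟨?_, ?_⟩ <;> dsimp only <;> omega
      · simpa [if_pos h1, if_neg h2] using hst2
    · simpa [if_neg h1] using hst2
  dsimp only at main
  omega

def pvLoopA (rows cols : Int) (grid : List String) (result : Int) : Int :=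
  let st := pvPassA rows cols grid result
  if h : st.2 = result then st.2 else pvLoopA rows cols st.1 st.2
termination_by pvAtCount grid
decreasing_by exact pvPassA_dec rows cols grid result h

def part2 (grid : List String) : Int :=
  let rows : Int := PySem.List.len grid
  let cols : Int := if rows > 0 then PySem.Str.len (grid.headD "") else 0  -- len(grid[0]), guarded by rows > 0
  pvLoopA rows cols grid 0

-- ===== PORT B =====
def pvNeighborsAlive (rows cols : Int) (alive : PySem.Set (Int × Int)) (r c : Int) : Int :=
  pvDirs.foldl (fun a d =>
    if 0 ≤ r + d.1 ∧ r + d.1 < rows ∧ 0 ≤ c + d.2 ∧ c + d.2 < cols ∧ (r + d.1, c + d.2) ∈ alive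
    then a + 1 else a) 0

-- one sweep of the doubly nested for-loop inside B's while-body; cnt[(r,c)] is ported as getD _ 0:
-- every in-bounds key is inserted by the initialisation loop, so the Python lookup never raises
def pvPassB (rows cols : Int)
    (st : PySem.Set (Int × Int) × PySem.Dict (Int × Int) Int × Int) :
    PySem.Set (Int × Int) × PySem.Dict (Int × Int) Int × Int :=
  (PySem.List.pyRange 0 rows 1).foldl (fun st r =>
    (PySem.List.pyRange 0 cols 1).foldl (fun st c =>
      if (r, c) ∈ st.1 ∧ st.2.1.getD (r, c) 0 < 4 then
        (PySem.Set.discard st.1 (r, c),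
         pvDirs.foldl (fun m d =>
           if 0 ≤ r + d.1 ∧ r + d.1 < rows ∧ 0 ≤ c + d.2 ∧ c + d.2 < cols then
             m.insert (r + d.1, c + d.2) (m.getD (r + d.1, c + d.2) 0 - 1) else m) st.2.1,
         st.2.2 + 1)
      else st) st) st

-- a sweep that changed `removed` discarded at least one member of `alive`
lemma pvPassB_dec (rows cols : Int) (alive : PySem.Set (Int × Int))
    (cnt : PySem.Dict (Int × Int) Int) (removed : Int)
    (h : ¬ (pvPassB rows cols (alive, cnt, removed)).2.2 = removed) :
    (pvPassB rows cols (alive, cnt, removed)).1.length < alive.length := by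
  have main : (fun st : PySem.Set (Int × Int) × PySem.Dict (Int × Int) Int × Int =>
      (st.1.length : Int) + st.2.2 ≤ (alive.length : Int) + removed ∧ removed ≤ st.2.2)
      (pvPassB rows cols (alive, cnt, removed)) := by
    unfold pvPassB
    refine List.foldlRecOn (motive := fun st : PySem.Set (Int × Int) × PySem.Dict (Int × Int) Int × Int =>
        (st.1.length : Int) + st.2.2 ≤ (alive.length : Int) + removed ∧ removed ≤ st.2.2)
      _ _ ⟨le_refl _, le_refl removed⟩ ?_
    intro st hst r hr
    refine List.foldlRecOn (motive := fun st : PySem.Set (Int × Int) × PySem.Dict (Int × Int) Int × Int =>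
        (st.1.length : Int) + st.2.2 ≤ (alive.length : Int) + removed ∧ removed ≤ st.2.2)
      _ _ hst ?_
    intro st2 hst2 c hc
    by_cases h1 : (r, c) ∈ st2.1 ∧ st2.2.1.getD (r, c) 0 < 4
    · simp only [if_pos h1]
      have hlen : (PySem.Set.discard st2.1 (r, c)).length < st2.1.length := by
        unfold PySem.Set.discard
        exact List.length_filter_lt_length_iff_exists.mpr ⟨(r, c), h1.1, by simp⟩
      refine ⟨?_, ?_⟩ <;> dsimp only <;> omega
    · simpa [if_neg h1] using hst2
  dsimp only at main
  omega

def pvLoopB (rows cols : Int) (alive : PySem.Set (Int × Int))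
    (cnt : PySem.Dict (Int × Int) Int) (removed : Int) : Int :=
  let st := pvPassB rows cols (alive, cnt, removed)
  if h : st.2.2 = removed then st.2.2 else pvLoopB rows cols st.1 st.2.1 st.2.2
termination_by alive.length
decreasing_by exact pvPassB_dec rows cols alive cnt removed h

def part2_alt (grid : List String) : Int :=
  let rows : Int := PySem.List.len grid
  let cols : Int := if rows > 0 then PySem.Str.len (grid.headD "") else 0  -- len(grid[0]), guarded by rows > 0
  let alive : PySem.Set (Int × Int) :=
    (PySem.List.pyRange 0 rows 1).foldl (fun al r =>
      (PySem.List.pyRange 0 cols 1).foldl (fun al c =>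
        if pvAt grid r c = some '@' then PySem.Set.add al (r, c) else al) al) PySem.Set.empty
  let cnt : PySem.Dict (Int × Int) Int :=
    (PySem.List.pyRange 0 rows 1).foldl (fun m r =>
      (PySem.List.pyRange 0 cols 1).foldl (fun m c =>
        m.insert (r, c) (pvNeighborsAlive rows cols alive r c)) m) PySem.Dict.empty
  pvLoopB rows cols alive cnt 0

-- ===== PRECONDITION & SPEC =====
-- Pre_ excludes exactly the grids whose later rows are shorter than row 0: there Python A raises
-- IndexError on grid[r][c] (rows longer than row 0 are fine — A never reads past column cols-1).
def Pre_part2 (grid : List String) : Prop := ∀ s ∈ grid, (grid.headD "").toList.length ≤ s.toList.length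
instance (grid : List String) : Decidable (Pre_part2 grid) := by unfold Pre_part2; infer_instance

def pvWitness_part2 : List String := ["@@@.", "@@@@", ".@@@"]

def Spec_part2 (grid : List String) (out : Int) : Prop := out = part2_alt grid
instance (grid : List String) (out : Int) : Decidable (Spec_part2 grid out) := by unfold Spec_part2; infer_instance

-- ===== CLAIM (what is proved, stated in full; the proofs are below) =====
def Claim_equal_part2 : Prop := ∀ (grid : List String), Dom_part2 grid → Pre_part2 grid → Spec_part2 grid (part2 grid)

-- ===== LEMMAS AND PROOFS =====

-- two folds over the same list preserve a binary relation if every step does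
lemma pvFoldlBisim {α σ τ : Type} (R : σ → τ → Prop) (l : List α) (f : σ → α → σ) (g : τ → α → τ)
    (s : σ) (t : τ) (h0 : R s t) (h : ∀ s t x, x ∈ l → R s t → R (f s x) (g t x)) :
    R (l.foldl f s) (l.foldl g t) := by
  induction l generalizing s t with
  | nil => exact h0
  | cons a l ih => exact ih (f s a) (g t a) (h s t a (by simp) h0) (fun s t x hx => h s t x (by simp [hx]))

def pvInb (rows cols : Int) (p : Int × Int) : Prop :=
  0 ≤ p.1 ∧ p.1 < rows ∧ 0 ≤ p.2 ∧ p.2 < cols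

-- the bisimulation invariant tying A's state (grid, result) to B's state (alive, cnt, removed)
def pvInv (grid0 : List String) (rows cols : Int) (s : List String × Int)
    (t : PySem.Set (Int × Int) × PySem.Dict (Int × Int) Int × Int) : Prop :=
  s.1.map (fun x => x.toList.length) = grid0.map (fun x => x.toList.length) ∧
  s.2 = t.2.2 ∧
  (∀ p : Int × Int, p ∈ t.1 ↔ (pvInb rows cols p ∧ pvAt s.1 p.1 p.2 = some '@')) ∧
  (∀ p : Int × Int, pvInb rows cols p → t.2.1.getD p 0 = pvNeighborsAlive rows cols t.1 p.1 p.2)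

lemma pvAt_setDot (g : List String) (r c r' c' : Int) (hr : 0 ≤ r) (hc : 0 ≤ c)
    (hr' : 0 ≤ r') (hc' : 0 ≤ c') (h : pvAt g r c = some '@') :
    pvAt (pvSetDot g r c) r' c' = if r' = r ∧ c' = c then some '.' else pvAt g r' c' := by
  obtain ⟨row, hrow, hch⟩ := pvAt_elim g r c '@' hr hc h
  obtain ⟨hlt, -⟩ := List.getElem?_eq_some_iff.mp hch
  rw [pvSetDot_eq g r c hr hc row (by rw [PySem.List.pyGet?_of_nonneg _ hr, hrow]) hlt]
  rw [pvAt_nonneg _ _ _ hr' hc', pvAt_nonneg _ _ _ hr' hc']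
  by_cases hrr : r' = r
  · subst hrr
    rw [List.getElem?_set_self (by exact (List.getElem?_eq_some_iff.mp hrow).1), hrow]
    simp only [Option.bind_some, String.toList_ofList]
    by_cases hcc : c' = c
    · subst hcc
      rw [List.getElem?_set_self (by exact hlt)]
      simp
    · have : c'.toNat ≠ c.toNat := by omega
      rw [List.getElem?_set_ne this.symm]
      simp [hcc]
  · have : r.toNat ≠ r'.toNat := by omega
    rw [List.getElem?_set_ne this]
    simp [hrr]

-- the changed row keeps its length, so the shape of the grid is preserved
lemma pvShape_setDot (g : List String) (r c : Int) (hr : 0 ≤ r) (hc : 0 ≤ c)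
    (h : pvAt g r c = some '@') :
    (pvSetDot g r c).map (fun x => x.toList.length) = g.map (fun x => x.toList.length) := by
  obtain ⟨row, hrow, hch⟩ := pvAt_elim g r c '@' hr hc h
  obtain ⟨hlt, -⟩ := List.getElem?_eq_some_iff.mp hch
  obtain ⟨hrl, hre⟩ := List.getElem?_eq_some_iff.mp hrow
  rw [pvSetDot_eq g r c hr hc row (by rw [PySem.List.pyGet?_of_nonneg _ hr, hrow]) hlt]
  rw [List.map_set]
  simp only [String.toList_ofList, List.length_set]
  rw [show row.toList.length = (g.map (fun x => x.toList.length))[r.toNat]'(by simpa using hrl) from by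
    rw [List.getElem_map, hre]]
  exact List.set_getElem_self (by simpa using hrl)

-- dirs is symmetric: d ∈ dirs ↔ -d ∈ dirs
lemma pvDirs_neg (a b : Int) : (a, b) ∈ pvDirs ↔ (-a, -b) ∈ pvDirs := by
  simp [pvDirs, Prod.ext_iff]; omega

-- generic counting helpers on a Nodup list
lemma pvCountP_and_eq {α : Type} [BEq α] [LawfulBEq α] (L : List α) (hnd : L.Nodup)
    (f : α → Bool) (x0 : α) :
    L.countP (fun d => f d && (d == x0)) = (if x0 ∈ L ∧ f x0 = true then 1 else 0) := by
  induction L with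
  | nil => simp
  | cons a T ih =>
    simp only [List.nodup_cons] at hnd
    rw [List.countP_cons, ih hnd.2]
    by_cases hax : a = x0
    · subst hax
      by_cases hf : f a = true <;> simp [hnd.1, hf]
    · have hb : (a == x0) = false := by simp [hax]
      have hiff : (x0 ∈ a :: T ∧ f x0 = true) ↔ (x0 ∈ T ∧ f x0 = true) := by
        constructor
        · rintro ⟨h1, h2⟩
          rcases List.mem_cons.mp h1 with h | h
          · exact absurd h.symm hax
          · exact ⟨h, h2⟩
        · rintro ⟨h1, h2⟩
          exact ⟨List.mem_cons_of_mem _ h1, h2⟩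
      rw [if_congr hiff rfl rfl]
      simp [hb]

lemma pvCountP_and_ne {α : Type} [BEq α] [LawfulBEq α] (L : List α) (hnd : L.Nodup)
    (f : α → Bool) (x0 : α) :
    L.countP f = L.countP (fun d => f d && !(d == x0)) + (if x0 ∈ L ∧ f x0 = true then 1 else 0) := by
  induction L with
  | nil => simp
  | cons a T ih =>
    simp only [List.nodup_cons] at hnd
    rw [List.countP_cons, List.countP_cons, ih hnd.2]
    by_cases hax : a = x0
    · subst hax
      by_cases hf : f a = true <;> simp [hnd.1, hf]
    · have hb : (a == x0) = false := by simp [hax]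
      have hiff : (x0 ∈ a :: T ∧ f x0 = true) ↔ (x0 ∈ T ∧ f x0 = true) := by
        constructor
        · rintro ⟨h1, h2⟩
          rcases List.mem_cons.mp h1 with h | h
          · exact absurd h.symm hax
          · exact ⟨h, h2⟩
        · rintro ⟨h1, h2⟩
          exact ⟨List.mem_cons_of_mem _ h1, h2⟩
      rw [if_congr hiff rfl rfl]
      simp only [hb, Bool.not_false, Bool.and_true]
      omega

lemma pvDirs_nodup : pvDirs.Nodup := by decide

-- C1: the eight decrements change cnt exactly at the in-bounds neighbours of q
lemma pvDecFold_getD (rows cols : Int) (L : List (Int × Int)) (qr qc : Int)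
    (m : PySem.Dict (Int × Int) Int) (p : Int × Int) :
    (L.foldl (fun m d =>
        if 0 ≤ qr + d.1 ∧ qr + d.1 < rows ∧ 0 ≤ qc + d.2 ∧ qc + d.2 < cols then
          m.insert (qr + d.1, qc + d.2) (m.getD (qr + d.1, qc + d.2) 0 - 1) else m) m).getD p 0
      = m.getD p 0 - (L.countP (fun d =>
          decide (0 ≤ qr + d.1 ∧ qr + d.1 < rows ∧ 0 ≤ qc + d.2 ∧ qc + d.2 < cols) &&
          ((qr + d.1, qc + d.2) == p)) : Int) := by
  induction L generalizing m with
  | nil => simp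
  | cons d L ih =>
    rw [List.foldl_cons, List.countP_cons, ih]
    by_cases hin : 0 ≤ qr + d.1 ∧ qr + d.1 < rows ∧ 0 ≤ qc + d.2 ∧ qc + d.2 < cols
    · by_cases hp : p = (qr + d.1, qc + d.2)
      · have hbeq : ((qr + d.1, qc + d.2) == p) = true := by simp [hp]
        rw [if_pos hin, PySem.Dict.getD_insert, if_pos hp, hp]
        simp only [hin, and_self, decide_true, beq_self_eq_true, Bool.and_true, if_true]
        push_cast
        omega
      · have hbeq : ((qr + d.1, qc + d.2) == p) = false := by
          simp only [beq_eq_false_iff_ne, ne_eq]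
          exact fun h => hp h.symm
        rw [if_pos hin, PySem.Dict.getD_insert, if_neg hp]
        simp [hbeq]
    · rw [if_neg hin]
      simp [hin]

lemma pvDec8_getD (rows cols : Int) (cnt : PySem.Dict (Int × Int) Int) (qr qc : Int) (p : Int × Int)
    (hp : pvInb rows cols p) :
    (pvDirs.foldl (fun m d =>
        if 0 ≤ qr + d.1 ∧ qr + d.1 < rows ∧ 0 ≤ qc + d.2 ∧ qc + d.2 < cols then
          m.insert (qr + d.1, qc + d.2) (m.getD (qr + d.1, qc + d.2) 0 - 1) else m) cnt).getD p 0
      = cnt.getD p 0 - (if (p.1 - qr, p.2 - qc) ∈ pvDirs then 1 else 0) := by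
  unfold pvInb at hp
  rw [pvDecFold_getD]
  rw [List.countP_congr (q := fun d : Int × Int =>
      decide (0 ≤ qr + d.1 ∧ qr + d.1 < rows ∧ 0 ≤ qc + d.2 ∧ qc + d.2 < cols)
        && (d == (p.1 - qr, p.2 - qc)))
    (by intro x hx
        simp only [Bool.and_eq_true, decide_eq_true_iff, beq_iff_eq, Prod.ext_iff]
        omega)]
  rw [pvCountP_and_eq pvDirs pvDirs_nodup _ (p.1 - qr, p.2 - qc)]
  have hf : (decide (0 ≤ qr + (p.1 - qr, p.2 - qc).1 ∧ qr + (p.1 - qr, p.2 - qc).1 < rows ∧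
      0 ≤ qc + (p.1 - qr, p.2 - qc).2 ∧ qc + (p.1 - qr, p.2 - qc).2 < cols)) = true := by
    simp only [decide_eq_true_iff]
    omega
  rw [if_congr (and_iff_left hf) rfl rfl]
  split_ifs <;> simp

-- C2: discarding q lowers the live-neighbour count exactly at q's neighbours
lemma pvNbrs_discard (rows cols : Int) (al : PySem.Set (Int × Int)) (qr qc : Int)
    (hq : (qr, qc) ∈ al) (hqin : pvInb rows cols (qr, qc)) (pr pc : Int) :
    pvNeighborsAlive rows cols (PySem.Set.discard al (qr, qc)) pr pc
      = pvNeighborsAlive rows cols al pr pc - (if (qr - pr, qc - pc) ∈ pvDirs then 1 else 0) := by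
  unfold pvInb at hqin
  unfold pvNeighborsAlive
  rw [PySem.List.foldl_ite_add_one, PySem.List.foldl_ite_add_one]
  rw [List.countP_congr (q := fun d : Int × Int =>
      decide (0 ≤ pr + d.1 ∧ pr + d.1 < rows ∧ 0 ≤ pc + d.2 ∧ pc + d.2 < cols ∧ (pr + d.1, pc + d.2) ∈ al)
        && !(d == (qr - pr, qc - pc)))
    (by intro x hx
        have hN : (pr + x.1, pc + x.2) ≠ (qr, qc) ↔ ¬ (x = (qr - pr, qc - pc)) :=
          not_congr (by simp only [Prod.ext_iff]; omega)
        simp only [Bool.and_eq_true, Bool.not_eq_eq_eq_not, Bool.not_true, decide_eq_true_iff,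
          PySem.Set.mem_discard, beq_eq_false_iff_ne, ne_eq]
        constructor
        · rintro ⟨h1, h2, h3, h4, h5, h6⟩
          exact ⟨⟨h1, h2, h3, h4, h5⟩, hN.mp h6⟩
        · rintro ⟨⟨h1, h2, h3, h4, h5⟩, h6⟩
          exact ⟨h1, h2, h3, h4, h5, hN.mpr h6⟩)]
  have hfx0 : (fun d : Int × Int =>
      decide (0 ≤ pr + d.1 ∧ pr + d.1 < rows ∧ 0 ≤ pc + d.2 ∧ pc + d.2 < cols ∧ (pr + d.1, pc + d.2) ∈ al))
      (qr - pr, qc - pc) = true := by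
    simp only [decide_eq_true_iff]
    refine ⟨by omega, by omega, by omega, by omega, ?_⟩
    have : (pr + (qr - pr), pc + (qc - pc)) = (qr, qc) := by
      simp only [Prod.ext_iff]
      omega
    rw [this]
    exact hq
  have h2 := pvCountP_and_ne pvDirs pvDirs_nodup (fun d : Int × Int =>
      decide (0 ≤ pr + d.1 ∧ pr + d.1 < rows ∧ 0 ≤ pc + d.2 ∧ pc + d.2 < cols ∧ (pr + d.1, pc + d.2) ∈ al))
      (qr - pr, qc - pc)
  rw [if_congr (and_iff_left hfx0) rfl rfl] at h2
  by_cases hm : (qr - pr, qc - pc) ∈ pvDirs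
  · simp only [hm, if_true] at h2 ⊢
    omega
  · simp only [hm, if_false] at h2 ⊢
    omega

-- under the invariant, A's recomputed neighbour count equals B's count over the alive set
lemma pvFindAdj_eq (grid0 : List String) (rows cols : Int) (g : List String)
    (al : PySem.Set (Int × Int))
    (hrows : rows = PySem.List.len grid0)
    (hcols : cols = (if (PySem.List.len grid0) > 0 then PySem.Str.len (grid0.headD "") else 0))
    (hshape : g.map (fun x => x.toList.length) = grid0.map (fun x => x.toList.length))
    (hmem : ∀ p : Int × Int, p ∈ al ↔ (pvInb rows cols p ∧ pvAt g p.1 p.2 = some '@'))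
    (r c : Int) :
    find_adjacent_count g r c = pvNeighborsAlive rows cols al r c := by
  have hlen : g.length = grid0.length := by
    have h := congrArg List.length hshape
    simpa using h
  have hrowsg : (PySem.List.len g) = rows := by
    rw [hrows]
    simp [PySem.List.len_eq, hlen]
  have hcolsg : (if (PySem.List.len g) > 0 then PySem.Str.len (g.headD "") else 0) = cols := by
    rw [hcols, hrowsg, hrows]
    cases g with
    | nil =>
      cases grid0 with
      | nil => rfl
      | cons b t' => exact absurd hlen (by simp)
    | cons a t =>
      cases grid0 with
      | nil => exact absurd hlen (by simp)
      | cons b t' =>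
        have hab : a.toList.length = b.toList.length := by
          have := congrArg (fun l => l.headD 0) hshape
          simpa using this
        simp only [List.headD_cons]
        have hst : PySem.Str.len a = PySem.Str.len b := by
          simp only [PySem.Str.len_eq]
          exact_mod_cast hab
        rw [hst]
  unfold find_adjacent_count pvNeighborsAlive
  dsimp only
  rw [hcolsg, hrowsg]
  apply PySem.List.foldl_congr_mem
  intro acc x hx
  apply if_congr _ rfl rfl
  constructor
  · rintro ⟨h1, h2, h3, h4, h5⟩
    refine ⟨h1, h2, h3, h4, (hmem _).mpr ⟨?_, h5⟩⟩
    exact ⟨h1, h2, h3, h4⟩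
  · rintro ⟨h1, h2, h3, h4, h5⟩
    exact ⟨h1, h2, h3, h4, ((hmem _).mp h5).2⟩

lemma pvAddFold_mem_inner (grid : List String) (r : Int) (cs : List Int)
    (al : PySem.Set (Int × Int)) (p : Int × Int) :
    p ∈ (cs.foldl (fun al c => if pvAt grid r c = some '@' then PySem.Set.add al (r, c) else al) al) ↔
      p ∈ al ∨ (p.1 = r ∧ p.2 ∈ cs ∧ pvAt grid r p.2 = some '@') := by
  induction cs generalizing al with
  | nil => simp
  | cons c cs ih =>
    rw [List.foldl_cons, ih]
    by_cases hch : pvAt grid r c = some '@'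
    · simp only [if_pos hch, PySem.Set.mem_add, List.mem_cons, Prod.ext_iff]
      constructor
      · rintro ((h | h) | h)
        · exact Or.inl h
        · exact Or.inr ⟨h.1, Or.inl h.2, by rw [h.2]; exact hch⟩
        · exact Or.inr ⟨h.1, Or.inr h.2.1, h.2.2⟩
      · rintro (h | ⟨h1, h2 | h2, h3⟩)
        · exact Or.inl (Or.inl h)
        · exact Or.inl (Or.inr ⟨h1, h2⟩)
        · exact Or.inr ⟨h1, h2, h3⟩
    · simp only [if_neg hch, List.mem_cons]
      constructor
      · rintro (h | h)
        · exact Or.inl h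
        · exact Or.inr ⟨h.1, Or.inr h.2.1, h.2.2⟩
      · rintro (h | ⟨h1, h2 | h2, h3⟩)
        · exact Or.inl h
        · rw [h2] at h3
          exact absurd h3 hch
        · exact Or.inr ⟨h1, h2, h3⟩

lemma pvAddFold_mem_outer (grid : List String) (cols : Int) (rs : List Int)
    (al : PySem.Set (Int × Int)) (p : Int × Int) :
    p ∈ (rs.foldl (fun al r =>
        (PySem.List.pyRange 0 cols 1).foldl
          (fun al c => if pvAt grid r c = some '@' then PySem.Set.add al (r, c) else al) al) al) ↔
      p ∈ al ∨ (p.1 ∈ rs ∧ p.2 ∈ PySem.List.pyRange 0 cols 1 ∧ pvAt grid p.1 p.2 = some '@') := by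
  induction rs generalizing al with
  | nil => simp
  | cons r rs ih =>
    rw [List.foldl_cons, ih, pvAddFold_mem_inner]
    simp only [List.mem_cons]
    constructor
    · rintro ((h | ⟨h1, h2, h3⟩) | ⟨h1, h2, h3⟩)
      · exact Or.inl h
      · exact Or.inr ⟨Or.inl h1, h2, by rw [h1]; exact h3⟩
      · exact Or.inr ⟨Or.inr h1, h2, h3⟩
    · rintro (h | ⟨h1 | h1, h2, h3⟩)
      · exact Or.inl (Or.inl h)
      · exact Or.inl (Or.inr ⟨h1, h2, by rw [← h1]; exact h3⟩)
      · exact Or.inr ⟨h1, h2, h3⟩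

-- initialisation of `alive`
lemma pvAliveInit_mem (grid : List String) (rows cols : Int) (p : Int × Int) :
    p ∈ ((PySem.List.pyRange 0 rows 1).foldl (fun al r =>
      (PySem.List.pyRange 0 cols 1).foldl (fun al c =>
        if pvAt grid r c = some '@' then PySem.Set.add al (r, c) else al) al)
      (PySem.Set.empty : PySem.Set (Int × Int)))
    ↔ (pvInb rows cols p ∧ pvAt grid p.1 p.2 = some '@') := by
  rw [pvAddFold_mem_outer]
  simp only [PySem.List.mem_pyRange_one, pvInb]
  constructor
  · rintro (h | ⟨⟨h1, h2⟩, ⟨h3, h4⟩, h5⟩)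
    · simp at h
    · exact ⟨⟨h1, h2, h3, h4⟩, h5⟩
  · rintro ⟨⟨h1, h2, h3, h4⟩, h5⟩
    exact Or.inr ⟨⟨h1, h2⟩, ⟨h3, h4⟩, h5⟩

lemma pvInsFold_getD_inner (rows cols : Int) (al : PySem.Set (Int × Int)) (r : Int)
    (cs : List Int) (m : PySem.Dict (Int × Int) Int) (p : Int × Int) :
    (cs.foldl (fun m c => m.insert (r, c) (pvNeighborsAlive rows cols al r c)) m).getD p 0 =
      if p.1 = r ∧ p.2 ∈ cs then pvNeighborsAlive rows cols al p.1 p.2 else m.getD p 0 := by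
  induction cs generalizing m with
  | nil => simp
  | cons c cs ih =>
    rw [List.foldl_cons, ih]
    by_cases hmem : p.1 = r ∧ p.2 ∈ cs
    · simp [hmem]
    · rw [if_neg hmem, PySem.Dict.getD_insert]
      by_cases hp : p = (r, c)
      · rw [if_pos hp, if_pos ⟨by rw [hp], by rw [hp]; exact List.mem_cons_self⟩, hp]
      · rw [if_neg hp, if_neg]
        rintro ⟨h1, h2⟩
        rcases List.mem_cons.mp h2 with h2' | h2'
        · exact hp (Prod.ext_iff.mpr ⟨h1, h2'⟩)
        · exact hmem ⟨h1, h2'⟩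

lemma pvInsFold_getD_outer (rows cols : Int) (al : PySem.Set (Int × Int))
    (rs : List Int) (m : PySem.Dict (Int × Int) Int) (p : Int × Int) :
    (rs.foldl (fun m r =>
        (PySem.List.pyRange 0 cols 1).foldl
          (fun m c => m.insert (r, c) (pvNeighborsAlive rows cols al r c)) m) m).getD p 0 =
      if p.1 ∈ rs ∧ p.2 ∈ PySem.List.pyRange 0 cols 1 then pvNeighborsAlive rows cols al p.1 p.2
      else m.getD p 0 := by
  induction rs generalizing m with
  | nil => simp
  | cons r rs ih =>
    rw [List.foldl_cons, ih, pvInsFold_getD_inner]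
    by_cases hmem : p.1 ∈ rs ∧ p.2 ∈ PySem.List.pyRange 0 cols 1
    · rw [if_pos hmem, if_pos ⟨List.mem_cons_of_mem _ hmem.1, hmem.2⟩]
    · rw [if_neg hmem]
      by_cases hp : p.1 = r ∧ p.2 ∈ PySem.List.pyRange 0 cols 1
      · rw [if_pos hp, if_pos ⟨by rw [hp.1]; exact List.mem_cons_self, hp.2⟩]
      · rw [if_neg hp, if_neg]
        rintro ⟨h1, h2⟩
        rcases List.mem_cons.mp h1 with h1' | h1'
        · exact hp ⟨h1', h2⟩
        · exact hmem ⟨h1', h2⟩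

-- initialisation of `cnt`
lemma pvCntInit_getD (rows cols : Int) (al : PySem.Set (Int × Int)) (p : Int × Int)
    (hp : pvInb rows cols p) :
    ((PySem.List.pyRange 0 rows 1).foldl (fun m r =>
      (PySem.List.pyRange 0 cols 1).foldl (fun m c =>
        m.insert (r, c) (pvNeighborsAlive rows cols al r c)) m)
      (PySem.Dict.empty : PySem.Dict (Int × Int) Int)).getD p 0
    = pvNeighborsAlive rows cols al p.1 p.2 := by
  rw [pvInsFold_getD_outer]
  rw [if_pos]
  simp only [PySem.List.mem_pyRange_one]
  exact ⟨⟨hp.1, hp.2.1⟩, hp.2.2.1, hp.2.2.2⟩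

-- one cell step preserves the invariant
lemma pvCell_bisim (grid0 : List String) (rows cols : Int)
    (hrows : rows = PySem.List.len grid0)
    (hcols : cols = (if (PySem.List.len grid0) > 0 then PySem.Str.len (grid0.headD "") else 0))
    (r c : Int) (hr0 : 0 ≤ r) (hr1 : r < rows) (hc0 : 0 ≤ c) (hc1 : c < cols)
    (s : List String × Int) (t : PySem.Set (Int × Int) × PySem.Dict (Int × Int) Int × Int)
    (h : pvInv grid0 rows cols s t) :
    pvInv grid0 rows cols
      (if pvAt s.1 r c = some '@' then
        if find_adjacent_count s.1 r c < 4 then (pvSetDot s.1 r c, s.2 + 1) else s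
      else s)
      (if (r, c) ∈ t.1 ∧ t.2.1.getD (r, c) 0 < 4 then
        (PySem.Set.discard t.1 (r, c),
         pvDirs.foldl (fun m d =>
           if 0 ≤ r + d.1 ∧ r + d.1 < rows ∧ 0 ≤ c + d.2 ∧ c + d.2 < cols then
             m.insert (r + d.1, c + d.2) (m.getD (r + d.1, c + d.2) 0 - 1) else m) t.2.1,
         t.2.2 + 1)
      else t) := by
  obtain ⟨hshape, hres, hmem, hcnt⟩ := h
  have hinb_rc : pvInb rows cols (r, c) := ⟨hr0, hr1, hc0, hc1⟩
  have hfa := pvFindAdj_eq grid0 rows cols s.1 t.1 hrows hcols hshape hmem r c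
  have hcond : ((r, c) ∈ t.1 ∧ t.2.1.getD (r, c) 0 < 4) ↔
      (pvAt s.1 r c = some '@' ∧ find_adjacent_count s.1 r c < 4) := by
    have h1 := hmem (r, c)
    have h2 := hcnt (r, c) hinb_rc
    rw [hfa]
    constructor
    · rintro ⟨ha, hb⟩
      exact ⟨(h1.mp ha).2, by rw [← h2]; exact hb⟩
    · rintro ⟨ha, hb⟩
      exact ⟨h1.mpr ⟨hinb_rc, ha⟩, by rw [h2]; exact hb⟩
  by_cases hA1 : pvAt s.1 r c = some '@'
  · by_cases hA2 : find_adjacent_count s.1 r c < 4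
    · rw [if_pos hA1, if_pos hA2, if_pos (hcond.mpr ⟨hA1, hA2⟩)]
      have hq_mem : (r, c) ∈ t.1 := (hmem (r, c)).mpr ⟨hinb_rc, hA1⟩
      refine ⟨?_, ?_, ?_, ?_⟩
      · exact (pvShape_setDot s.1 r c hr0 hc0 hA1).trans hshape
      · dsimp only
        rw [hres]
      · intro p
        dsimp only
        rw [PySem.Set.mem_discard, hmem p]
        by_cases hpin : pvInb rows cols p
        · rw [pvAt_setDot s.1 r c p.1 p.2 hr0 hc0 hpin.1 hpin.2.2.1 hA1]
          by_cases hpq : p = (r, c)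
          · subst hpq
            simp [hpin]
          · have hne : ¬(p.1 = r ∧ p.2 = c) := fun hh => hpq (Prod.ext_iff.mpr hh)
            rw [if_neg hne]
            constructor
            · rintro ⟨⟨hh1, hh2⟩, -⟩
              exact ⟨hh1, hh2⟩
            · rintro ⟨hh1, hh2⟩
              exact ⟨⟨hh1, hh2⟩, hpq⟩
        · constructor
          · rintro ⟨⟨hh1, -⟩, -⟩
            exact absurd hh1 hpin
          · rintro ⟨hh1, -⟩
            exact absurd hh1 hpin
      · intro p hpv
        dsimp only
        rw [pvDec8_getD rows cols t.2.1 r c p hpv, hcnt p hpv,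
          pvNbrs_discard rows cols t.1 r c hq_mem hinb_rc p.1 p.2]
        have hsym : ((p.1 - r, p.2 - c) ∈ pvDirs) ↔ ((r - p.1, c - p.2) ∈ pvDirs) := by
          rw [pvDirs_neg (p.1 - r) (p.2 - c)]
          have he : (-(p.1 - r), -(p.2 - c)) = (r - p.1, c - p.2) := by
            simp only [Prod.ext_iff]
            omega
          rw [he]
        rw [if_congr hsym rfl rfl]
    · rw [if_pos hA1, if_neg hA2, if_neg (fun hh => hA2 (hcond.mp hh).2)]
      exact ⟨hshape, hres, hmem, hcnt⟩
  · rw [if_neg hA1, if_neg (fun hh => hA1 (hcond.mp hh).1)]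
    exact ⟨hshape, hres, hmem, hcnt⟩

lemma pvPass_bisim (grid0 : List String) (rows cols : Int)
    (hrows : rows = PySem.List.len grid0)
    (hcols : cols = (if (PySem.List.len grid0) > 0 then PySem.Str.len (grid0.headD "") else 0))
    (s : List String × Int) (t : PySem.Set (Int × Int) × PySem.Dict (Int × Int) Int × Int)
    (h : pvInv grid0 rows cols s t) :
    pvInv grid0 rows cols (pvPassA rows cols s.1 s.2) (pvPassB rows cols t) := by
  unfold pvPassA pvPassB
  refine pvFoldlBisim (pvInv grid0 rows cols) _ _ _ _ _ ?_ ?_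
  · exact h
  · intro s' t' r hr hR
    refine pvFoldlBisim (pvInv grid0 rows cols) _ _ _ _ _ hR ?_
    intro s'' t'' c hc hR2
    have hrb := PySem.List.mem_pyRange_one.mp hr
    have hcb := PySem.List.mem_pyRange_one.mp hc
    exact pvCell_bisim grid0 rows cols hrows hcols r c hrb.1 hrb.2 hcb.1 hcb.2 s'' t'' hR2

lemma pvLoop_bisim (grid0 : List String) (rows cols : Int)
    (hrows : rows = PySem.List.len grid0)
    (hcols : cols = (if (PySem.List.len grid0) > 0 then PySem.Str.len (grid0.headD "") else 0)) :
    ∀ (n : Nat) (g : List String) (res : Int) (al : PySem.Set (Int × Int))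
      (cnt : PySem.Dict (Int × Int) Int) (rem : Int), pvAtCount g ≤ n →
      pvInv grid0 rows cols (g, res) (al, cnt, rem) →
      pvLoopA rows cols g res = pvLoopB rows cols al cnt rem := by
  intro n
  induction n with
  | zero =>
    intro g res al cnt rem hle hinv
    have hpass := pvPass_bisim grid0 rows cols hrows hcols (g, res) (al, cnt, rem) hinv
    have hr2 : (pvPassA rows cols g res).2 = (pvPassB rows cols (al, cnt, rem)).2.2 := hpass.2.1
    rw [pvLoopA, pvLoopB]
    by_cases hstop : (pvPassA rows cols g res).2 = res
    · rw [dif_pos hstop, dif_pos (show (pvPassB rows cols (al, cnt, rem)).2.2 = rem by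
        rw [← hr2, hstop]; exact hinv.2.1)]
      exact hr2
    · exact absurd (pvPassA_dec rows cols g res hstop) (by omega)
  | succ n ih =>
    intro g res al cnt rem hle hinv
    have hpass := pvPass_bisim grid0 rows cols hrows hcols (g, res) (al, cnt, rem) hinv
    have hr2 : (pvPassA rows cols g res).2 = (pvPassB rows cols (al, cnt, rem)).2.2 := hpass.2.1
    rw [pvLoopA, pvLoopB]
    by_cases hstop : (pvPassA rows cols g res).2 = res
    · rw [dif_pos hstop, dif_pos (show (pvPassB rows cols (al, cnt, rem)).2.2 = rem by
        rw [← hr2, hstop]; exact hinv.2.1)]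
      exact hr2
    · rw [dif_neg hstop, dif_neg (show ¬ (pvPassB rows cols (al, cnt, rem)).2.2 = rem by
        rw [← hr2]; intro hh; exact hstop (by rw [hh]; exact hinv.2.1.symm))]
      apply ih
      · have := pvPassA_dec rows cols g res hstop
        omega
      · exact hpass

-- ===== VERDICT (by name: the statement is the Claim_ definition above) =====
theorem part2_spec : Claim_equal_part2 := by
  intro grid hdom hpre
  unfold Spec_part2 part2 part2_alt
  dsimp only
  apply pvLoop_bisim grid (PySem.List.len grid)
    (if (PySem.List.len grid) > 0 then PySem.Str.len (grid.headD "") else 0) rfl rfl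
    (pvAtCount grid) grid 0 _ _ 0 (le_refl _)
  refine ⟨rfl, rfl, ?_, ?_⟩
  · intro p
    exact pvAliveInit_mem grid (PySem.List.len grid) _ p
  · intro p hp
    exact pvCntInit_getD _ _ _ p hp
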